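-- pv_equiv track=rewrite | github.com/jediborre/pulpa | match/training/eda.py | _infer_gender
-- ===== SOURCE A (Python) =====
-- def _infer_gender(league: str, home_team: str, away_team: str) -> str:
--     text = f"{league} {home_team} {away_team}".lower()
--     markers = [
--         "women", "woman", "female", "femen", "fem.", " ladies ",
--         "(w)", " w ", "wnba", "girls",
--     ]
--     for marker in markers:
--         if marker in text:
--             return "women"
--     return "men_or_open"
-- ===== SOURCE B (Python) =====
-- def _infer_gender(league: str, home_team: str, away_team: str) -> str:
--     text = " ".join((league, home_team, away_team)).lower()
--     # index the markers by their first character, then make a single pass over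
--     # the text, testing only the marker tails that can start at each position
--     buckets = {}
--     for marker in ("women", "woman", "female", "femen", "fem.", " ladies ",
--                    "(w)", " w ", "wnba", "girls"):
--         buckets.setdefault(marker[0], []).append(marker[1:])
--     for pos, ch in enumerate(text):
--         for tail in buckets.get(ch, ()):
--             if text.startswith(tail, pos + 1):
--                 return "women"
--     return "men_or_open"
-- ===== Notes on version B (the rewrite author's own statement) =====
-- stated objective: alternative
-- what changed: A's ten independent 'marker in text' substring scans are replaced by a multi-pattern matcher: the markers are grouped into a dict keyed by first character, then one pass over the text tests at each position only the marker tails whose head matches the current character.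
import Mathlib
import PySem

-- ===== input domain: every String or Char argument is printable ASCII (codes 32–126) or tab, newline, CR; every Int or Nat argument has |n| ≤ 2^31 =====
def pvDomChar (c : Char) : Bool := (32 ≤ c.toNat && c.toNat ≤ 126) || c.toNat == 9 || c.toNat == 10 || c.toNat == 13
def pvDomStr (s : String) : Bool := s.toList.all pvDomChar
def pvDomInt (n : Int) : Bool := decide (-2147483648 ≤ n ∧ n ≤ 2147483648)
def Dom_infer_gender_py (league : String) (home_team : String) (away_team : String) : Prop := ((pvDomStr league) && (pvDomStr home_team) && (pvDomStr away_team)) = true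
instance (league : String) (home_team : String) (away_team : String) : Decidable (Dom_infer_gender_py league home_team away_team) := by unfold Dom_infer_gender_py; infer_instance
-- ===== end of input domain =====

-- B replaces A's ten independent substring scans by one pass over the text with the
-- markers indexed by first character (alternative decomposition, same value).

-- ===== PORT A =====
-- text = f"{league} {home_team} {away_team}".lower(), on code points
def pvAText (league : String) (home_team : String) (away_team : String) : List Char :=
  PySem.Chars.lower (league.toList ++ [' '] ++ home_team.toList ++ [' '] ++ away_team.toList)

def pvAMarkers : List (List Char) :=
  ["women".toList, "woman".toList, "female".toList, "femen".toList, "fem.".toList,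
   " ladies ".toList, "(w)".toList, " w ".toList, "wnba".toList, "girls".toList]

-- A's loop: first marker found in text returns "women", else fall through
def pvALoop (text : List Char) : List (List Char) → String
  | [] => "men_or_open"
  | m :: rest => if PySem.Chars.isIn m text then "women" else pvALoop text rest

def infer_gender_py (league : String) (home_team : String) (away_team : String) : String :=
  pvALoop (pvAText league home_team away_team) pvAMarkers

-- ===== PORT B =====
-- buckets: markers grouped by first character (Python's setdefault/append loop);
-- marker[0] on the nonempty literals never raises, so the [] match arm is unreachable
def pvBBuckets : PySem.Dict Char (List (List Char)) :=
  [['w','o','m','e','n'], ['w','o','m','a','n'], ['f','e','m','a','l','e'],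
   ['f','e','m','e','n'], ['f','e','m','.'], [' ','l','a','d','i','e','s',' '],
   ['(','w',')'], [' ','w',' '], ['w','n','b','a'], ['g','i','r','l','s']].foldl
    (fun d m =>
      match m with
      | [] => d
      | c :: tail => d.insert c ((d.getD c []) ++ [tail]))
    PySem.Dict.empty

-- the pass over (pos, ch) = enumerate(text): recursion over the suffixes;
-- text.startswith(tail, pos+1) is "tail is a prefix of the rest after ch"
def pvBPass : List Char → Bool
  | [] => false
  | ch :: rest =>
      (pvBBuckets.getD ch []).any (fun tail => PySem.Chars.startswith rest tail) || pvBPass rest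

def infer_gender_py_alt (league : String) (home_team : String) (away_team : String) : String :=
  if pvBPass (PySem.Chars.lower ((league ++ " " ++ home_team ++ " " ++ away_team).toList))
  then "women" else "men_or_open"

-- ===== PRECONDITION & SPEC =====
def Spec_infer_gender_py (league : String) (home_team : String) (away_team : String) (out : String) : Prop := out = infer_gender_py_alt league home_team away_team
instance (league : String) (home_team : String) (away_team : String) (out : String) : Decidable (Spec_infer_gender_py league home_team away_team out) := by unfold Spec_infer_gender_py; infer_instance

-- ===== CLAIM (what is proved, stated in full; the proofs are below) =====
def Claim_equal_infer_gender_py : Prop := ∀ (league : String) (home_team : String) (away_team : String), Dom_infer_gender_py league home_team away_team → Spec_infer_gender_py league home_team away_team (infer_gender_py league home_team away_team)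

-- ===== LEMMAS AND PROOFS =====

-- A's loop returns "women" exactly when some marker is a substring of text
theorem pvALoop_eq (text : List Char) (ms : List (List Char)) :
    pvALoop text ms =
      if ms.any (fun m => PySem.Chars.isIn m text) then "women" else "men_or_open" := by
  induction ms with
  | nil => simp [pvALoop]
  | cons m rest ih =>
      simp only [pvALoop, List.any_cons, Bool.or_eq_true]
      by_cases h : PySem.Chars.isIn m text = true <;> simp [h, ih]

-- both definitions written out as literal char lists (kernel computations)
theorem pvBBuckets_lit : pvBBuckets = PySem.Dict.mk
  [('w', [['o','m','e','n'], ['o','m','a','n'], ['n','b','a']]),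
   ('f', [['e','m','a','l','e'], ['e','m','e','n'], ['e','m','.']]),
   (' ', [['l','a','d','i','e','s',' '], ['w',' ']]),
   ('(', [['w',')']]),
   ('g', [['i','r','l','s']])] := by decide

theorem pvAMarkers_lit : pvAMarkers =
  [['w','o','m','e','n'], ['w','o','m','a','n'], ['f','e','m','a','l','e'],
   ['f','e','m','e','n'], ['f','e','m','.'], [' ','l','a','d','i','e','s',' '],
   ['(','w',')'], [' ','w',' '], ['w','n','b','a'], ['g','i','r','l','s']] := by decide

theorem pvAMarkers_ne_nil : ∀ m ∈ pvAMarkers, m ≠ [] := by decide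

-- the bucket of c holds exactly the tails of the markers that start with c
set_option maxRecDepth 4096 in
theorem pvBBuckets_mem (c : Char) (t : List Char) :
    t ∈ pvBBuckets.getD c [] ↔ (c :: t) ∈ pvAMarkers := by
  rw [pvBBuckets_lit, pvAMarkers_lit]
  simp only [PySem.Dict.getD, PySem.Dict.get?_mk_cons]
  split_ifs with h1 h2 h3 h4 h5
  · simp only [beq_iff_eq] at h1; subst h1; simp
  · simp only [beq_iff_eq] at h2; subst h2; simp
  · simp only [beq_iff_eq] at h3; subst h3; simp
  · simp only [beq_iff_eq] at h4; subst h4; simp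
  · simp only [beq_iff_eq] at h5; subst h5; simp
  · simp only [beq_iff_eq] at h1 h2 h3 h4 h5
    simp [PySem.Dict.get?, Ne.symm h1, Ne.symm h2, Ne.symm h3, Ne.symm h4, Ne.symm h5]

-- B's pass is true exactly when some marker is an infix of the text
theorem pvBPass_iff (cs : List Char) :
    pvBPass cs = true ↔ ∃ m ∈ pvAMarkers, m <:+: cs := by
  induction cs with
  | nil =>
      simp only [pvBPass, Bool.false_eq_true, false_iff]
      rintro ⟨m, hm, hinf⟩
      exact pvAMarkers_ne_nil m hm (List.eq_nil_of_infix_nil hinf)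
  | cons ch rest ih =>
      simp only [pvBPass, Bool.or_eq_true, List.any_eq_true, ih]
      constructor
      · rintro (⟨t, ht, hsw⟩ | ⟨m, hm, hinf⟩)
        · refine ⟨ch :: t, (pvBBuckets_mem ch t).mp ht, List.IsPrefix.isInfix ?_⟩
          exact List.cons_prefix_cons.mpr ⟨rfl, (PySem.Chars.startswith_iff rest t).mp hsw⟩
        · exact ⟨m, hm, List.infix_cons_iff.mpr (Or.inr hinf)⟩
      · rintro ⟨m, hm, hinf⟩
        rcases List.infix_cons_iff.mp hinf with hpre | hinf'
        · obtain ⟨c0, t, rfl⟩ := List.exists_cons_of_ne_nil (pvAMarkers_ne_nil m hm)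
          obtain ⟨hc, htp⟩ := List.cons_prefix_cons.mp hpre
          subst hc
          exact Or.inl ⟨t, (pvBBuckets_mem c0 t).mpr hm,
            (PySem.Chars.startswith_iff rest t).mpr htp⟩
        · exact Or.inr ⟨m, hm, hinf'⟩

-- ===== VERDICT (by name: the statement is the Claim_ definition above) =====
theorem infer_gender_py_spec : Claim_equal_infer_gender_py := by
  intro league home_team away_team _
  unfold Spec_infer_gender_py infer_gender_py infer_gender_py_alt
  rw [pvALoop_eq]
  have htext : pvAText league home_team away_team =
      PySem.Chars.lower ((league ++ " " ++ home_team ++ " " ++ away_team).toList) := by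
    simp [pvAText, String.toList_append]
  rw [htext]
  have hcond :
      (pvAMarkers.any (fun m => PySem.Chars.isIn m
          (PySem.Chars.lower ((league ++ " " ++ home_team ++ " " ++ away_team).toList)))) =
        pvBPass (PySem.Chars.lower ((league ++ " " ++ home_team ++ " " ++ away_team).toList)) := by
    rw [Bool.eq_iff_iff, List.any_eq_true, pvBPass_iff]
    exact exists_congr fun m => and_congr_right fun _ =>
      PySem.Chars.isIn_iff_infix m _
  rw [hcond]
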